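-- pv_equiv track=rewrite | github.com/pannet1/halo-hash | halo_hash/main_telegram.py | is_available_in_position_book
-- ===== SOURCE A (Python) =====
-- def is_available_in_position_book(open_positions, config):
--     # set this to True sym_config["is_in_position_book"]
--     quantity = 0
--     desired_position = {}
--     life_cycle_state = "False"
--     for position in open_positions:
--         if config["symbol"] == position["symbol"]:  # Add strategy name here
--             dir = 1 if position["side"] == "B" else -1
--             quantity += int(position["quantity"]) * dir
--     for value in open_positions[::-1]:
--         if config["symbol"] == value["symbol"]:  # Add strategy name here
--             desired_position = value
--             break
--     for value in open_positions:
--         if config["symbol"] == value["symbol"]:  # Add strategy name here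
--             if value.get("life_cycle_state", "False") != "False":
--                 life_cycle_state = value.get("life_cycle_state")
--     return (quantity, desired_position, life_cycle_state)
-- ===== SOURCE B (Python) =====
-- def is_available_in_position_book(open_positions, config):
--     # single forward pass; same defaults; last match wins for desired_position
--     quantity = 0
--     desired_position = {}
--     life_cycle_state = "False"
--     for p in open_positions:
--         if config["symbol"] == p["symbol"]:
--             qty = int(p["quantity"])
--             quantity += qty if p["side"] == "B" else -qty
--             desired_position = p
--             state = p.get("life_cycle_state", "False")
--             if state != "False":
--                 life_cycle_state = state
--     return (quantity, desired_position, life_cycle_state)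
-- ===== Notes on version B (the rewrite author's own statement) =====
-- stated objective: simpler
-- what changed: Replaces A's three separate passes (forward quantity sum, reverse scan with break for the last matching position, forward scan for life_cycle_state) with one forward loop maintaining all three accumulators, overwriting desired_position so the last match wins.
import Mathlib
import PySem

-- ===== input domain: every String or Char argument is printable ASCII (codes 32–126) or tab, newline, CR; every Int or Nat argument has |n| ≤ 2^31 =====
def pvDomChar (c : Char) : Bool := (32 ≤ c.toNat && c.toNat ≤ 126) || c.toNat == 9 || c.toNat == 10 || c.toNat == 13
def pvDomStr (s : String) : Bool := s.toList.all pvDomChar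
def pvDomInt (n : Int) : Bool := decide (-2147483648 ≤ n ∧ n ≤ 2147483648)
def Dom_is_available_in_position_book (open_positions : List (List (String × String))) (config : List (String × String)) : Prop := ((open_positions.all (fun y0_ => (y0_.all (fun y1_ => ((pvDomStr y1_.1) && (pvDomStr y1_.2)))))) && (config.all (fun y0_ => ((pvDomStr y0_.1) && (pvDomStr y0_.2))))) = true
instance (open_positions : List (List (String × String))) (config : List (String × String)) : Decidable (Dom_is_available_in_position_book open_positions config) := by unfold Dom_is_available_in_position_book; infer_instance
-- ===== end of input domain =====

-- B replaces A's three passes over open_positions with one forward loop; equivalence of the return value on all inputs where A raises no exception (Pre_).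

-- dict lookup d[k] / d.get(k): first match in the association list
def pvGet (d : List (String × String)) (k : String) : Option String :=
  (d.find? (fun kv => kv.1 == k)).map (·.2)

-- int(d[k]); the default 0 is unreachable under Pre_ (it excludes missing key / ValueError)
def pvIntAt (d : List (String × String)) (k : String) : Int :=
  ((pvGet d k).bind PySem.Int.ofStr?).getD 0

-- ===== PORT A =====
def is_available_in_position_book (open_positions : List (List (String × String))) (config : List (String × String)) : Int × (List (String × String)) × String :=
  let quantity : Int := open_positions.foldl (fun q position =>
    if pvGet config "symbol" == pvGet position "symbol" then
      let dir : Int := if pvGet position "side" == some "B" then 1 else -1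
      q + pvIntAt position "quantity" * dir
    else q) 0
  -- reverse scan with break = first match of the reversed list; default {}
  let desired_position : List (String × String) :=
    (open_positions.reverse.find? (fun v => pvGet config "symbol" == pvGet v "symbol")).getD []
  let life_cycle_state : String := open_positions.foldl (fun l v =>
    if pvGet config "symbol" == pvGet v "symbol" then
      let g := (pvGet v "life_cycle_state").getD "False"
      if g ≠ "False" then g else l
    else l) "False"
  (quantity, desired_position, life_cycle_state)

-- ===== PORT B =====
def is_available_in_position_book_alt (open_positions : List (List (String × String))) (config : List (String × String)) : Int × (List (String × String)) × String :=
  open_positions.foldl (fun s p =>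
    if pvGet config "symbol" == pvGet p "symbol" then
      let qty := pvIntAt p "quantity"
      let state := (pvGet p "life_cycle_state").getD "False"
      (s.1 + (if pvGet p "side" == some "B" then qty else -qty), p,
        if state ≠ "False" then state else s.2.2)
    else s) (0, [], "False")

-- ===== PRECONDITION & SPEC =====
-- Exactly the inputs where the Python A returns normally: each position has a "symbol" key
-- (and config has one as soon as open_positions is nonempty), and every matching position
-- has a "side" key and a "quantity" value that int() parses.
def Pre_is_available_in_position_book (open_positions : List (List (String × String))) (config : List (String × String)) : Prop :=
  ∀ p ∈ open_positions,
    (config.find? (fun kv => kv.1 == "symbol")).isSome ∧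
    (p.find? (fun kv => kv.1 == "symbol")).isSome ∧
    (pvGet config "symbol" = pvGet p "symbol" →
      (p.find? (fun kv => kv.1 == "side")).isSome ∧
      ((pvGet p "quantity").bind PySem.Int.ofStr?).isSome)
instance (open_positions : List (List (String × String))) (config : List (String × String)) : Decidable (Pre_is_available_in_position_book open_positions config) := by unfold Pre_is_available_in_position_book; infer_instance

def pvWitness_is_available_in_position_book : (List (List (String × String))) × (List (String × String)) :=
  ([[("symbol", "X"), ("side", "B"), ("quantity", "2")]], [("symbol", "X")])

def Spec_is_available_in_position_book (open_positions : List (List (String × String))) (config : List (String × String)) (out : Int × (List (String × String)) × String) : Prop := out = is_available_in_position_book_alt open_positions config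
instance (open_positions : List (List (String × String))) (config : List (String × String)) (out : Int × (List (String × String)) × String) : Decidable (Spec_is_available_in_position_book open_positions config out) := by unfold Spec_is_available_in_position_book; infer_instance

-- ===== CLAIM (what is proved, stated in full; the proofs are below) =====
def Claim_equal_is_available_in_position_book : Prop := ∀ (open_positions : List (List (String × String))) (config : List (String × String)), Dom_is_available_in_position_book open_positions config → Pre_is_available_in_position_book open_positions config → Spec_is_available_in_position_book open_positions config (is_available_in_position_book open_positions config)

-- ===== LEMMAS AND PROOFS =====

-- a fold whose step updates the three components independently splits into three folds
theorem foldl_prod3 {α β γ δ : Type} (f : α → δ → α) (g : β → δ → β) (h : γ → δ → γ)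
    (xs : List δ) (a : α) (b : β) (c : γ) :
    xs.foldl (fun s p => (f s.1 p, g s.2.1 p, h s.2.2 p)) (a, b, c) =
      (xs.foldl f a, xs.foldl g b, xs.foldl h c) := by
  induction xs generalizing a b c with
  | nil => rfl
  | cons x xs ih => simpa using ih (f a x) (g b x) (h c x)

-- overwrite-on-match fold = first match of the reversed list
theorem foldl_overwrite_eq_reverse_find {δ : Type} (m : δ → Bool) (xs : List δ) (b : δ) :
    xs.foldl (fun s p => if m p then p else s) b =
      (xs.reverse.find? m).getD b := by
  induction xs generalizing b with
  | nil => rfl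
  | cons x xs ih =>
    simp only [List.foldl_cons, List.reverse_cons, List.find?_append, ih]
    cases hf : xs.reverse.find? m with
    | some v => simp
    | none => cases hm : m x <;> simp [List.find?, hm]

def stepQ (config : List (String × String)) (q : Int) (p : List (String × String)) : Int :=
  if pvGet config "symbol" == pvGet p "symbol" then
    q + (if pvGet p "side" == some "B" then pvIntAt p "quantity" else -pvIntAt p "quantity")
  else q

def stepD (config : List (String × String)) (d p : List (String × String)) : List (String × String) :=
  if pvGet config "symbol" == pvGet p "symbol" then p else d

def stepL (config : List (String × String)) (l : String) (p : List (String × String)) : String :=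
  if pvGet config "symbol" == pvGet p "symbol" then
    let g := (pvGet p "life_cycle_state").getD "False"
    if g ≠ "False" then g else l
  else l

theorem foldl_funext {a b : Type} (f g : a -> b -> a) (xs : List b) (x : a)
    (h : ∀ s p, f s p = g s p) : xs.foldl f x = xs.foldl g x := by
  have : f = g := funext fun s => funext fun p => h s p
  rw [this]

theorem is_available_in_position_book_eq (open_positions : List (List (String × String)))
    (config : List (String × String)) :
    is_available_in_position_book open_positions config =
      is_available_in_position_book_alt open_positions config := by
  have hstep : (fun (s : Int × List (String × String) × String) p =>
      if pvGet config "symbol" == pvGet p "symbol" then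
        let qty := pvIntAt p "quantity"
        let state := (pvGet p "life_cycle_state").getD "False"
        (s.1 + (if pvGet p "side" == some "B" then qty else -qty), p,
          if state ≠ "False" then state else s.2.2)
      else s)
      = (fun s p => (stepQ config s.1 p, stepD config s.2.1 p, stepL config s.2.2 p)) := by
    funext s p
    by_cases h : (pvGet config "symbol" == pvGet p "symbol") = true <;>
      simp [h, stepQ, stepD, stepL]
  simp only [is_available_in_position_book, is_available_in_position_book_alt, hstep,
    foldl_prod3]
  refine Prod.ext ?_ (Prod.ext ?_ ?_)
  · -- quantity: qty * dir = ±qty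
    refine foldl_funext _ _ _ _ fun q p => ?_
    by_cases h : (pvGet config "symbol" == pvGet p "symbol") = true <;>
      simp [h, stepQ] <;> split <;> ring
  · -- desired position: reverse find with default [] = overwrite fold
    exact (foldl_overwrite_eq_reverse_find
      (fun v => pvGet config "symbol" == pvGet v "symbol") open_positions []).symm
  · -- life_cycle_state: identical folds
    exact foldl_funext _ _ _ _ fun l p => rfl

-- ===== VERDICT (by name: the statement is the Claim_ definition above) =====
theorem is_available_in_position_book_spec : Claim_equal_is_available_in_position_book := by
  intro ops cfg _ _
  exact is_available_in_position_book_eq ops cfg
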